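-- pv_equiv track=rewrite | github.com/r3jen/genai-audit | utils.py | extract_text_and_tables
-- ===== SOURCE A (Python) =====
-- def extract_text_and_tables(md_content):
--     lines = md_content.split("\n")
--     tables = []
--     texts = []
--     current_table = []
--     current_text = []
--
--     for line in lines:
--         if "|" in line:  # Likely a table row
--             if current_text:
--                 texts.append("\n".join(current_text).strip())
--                 current_text = []
--             current_table.append(line)
--         else:  # Regular text
--             if current_table:
--                 tables.append(current_table)
--                 current_table = []
--             current_text.append(line)
--
--     if current_table:
--         tables.append(current_table)
--     if current_text:
--         texts.append("\n".join(current_text).strip())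
--
--     return texts, tables
-- ===== SOURCE B (Python) =====
-- def extract_text_and_tables(md_content):
--     # Run-grouping rewrite: split lines into maximal same-kind runs and emit
--     # each run at once, instead of A's boundary-flush accumulators.
--     lines = md_content.split("\n")
--     texts, tables = [], []
--     i, n = 0, len(lines)
--     while i < n:
--         key = "|" in lines[i]
--         j = i + 1
--         while j < n and ("|" in lines[j]) == key:
--             j += 1
--         run = lines[i:j]
--         if key:
--             tables.append(run)
--         else:
--             texts.append("\n".join(run).strip())
--         i = j
--     return texts, tables
-- ===== Notes on version B (the rewrite author's own statement) =====
-- stated objective: alternative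
-- what changed: Replaces A's boundary-flush accumulators (current_table/current_text with flush-on-kind-change and a trailing flush) by grouping the lines into maximal same-kind runs and emitting each run at once.
import Mathlib
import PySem

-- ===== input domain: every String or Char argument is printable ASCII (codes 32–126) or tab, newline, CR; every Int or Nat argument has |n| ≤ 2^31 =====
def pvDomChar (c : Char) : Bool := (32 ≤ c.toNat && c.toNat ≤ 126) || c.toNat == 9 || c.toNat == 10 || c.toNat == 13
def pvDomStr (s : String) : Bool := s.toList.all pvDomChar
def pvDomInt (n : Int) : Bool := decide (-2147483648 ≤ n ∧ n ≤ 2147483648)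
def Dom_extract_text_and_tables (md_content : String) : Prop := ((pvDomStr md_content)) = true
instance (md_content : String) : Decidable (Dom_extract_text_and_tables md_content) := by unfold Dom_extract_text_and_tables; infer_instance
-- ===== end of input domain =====

-- B replaces A's boundary-flush accumulator loop by grouping the lines into
-- maximal same-kind runs and emitting each run at once (objective: alternative).

-- ===== PORT A =====
-- loop body of A; state: (tables, texts, current_table, current_text)
def aStep (s : List (List String) × List String × List String × List String)
    (line : String) : List (List String) × List String × List String × List String :=
  if PySem.Str.isIn "|" line then
    let texts := if s.2.2.2 ≠ [] then s.2.1 ++ [PySem.Str.strip (PySem.Str.join "\n" s.2.2.2)] else s.2.1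
    (s.1, texts, s.2.2.1 ++ [line], [])
  else
    let tables := if s.2.2.1 ≠ [] then s.1 ++ [s.2.2.1] else s.1
    (tables, s.2.1, [], s.2.2.2 ++ [line])

def extract_text_and_tables (md_content : String) : List String × List (List String) :=
  let lines := (PySem.Str.split? md_content "\n").getD []
  let s := lines.foldl aStep ([], [], [], [])
  let tables := if s.2.2.1 ≠ [] then s.1 ++ [s.2.2.1] else s.1
  let texts := if s.2.2.2 ≠ [] then s.2.1 ++ [PySem.Str.strip (PySem.Str.join "\n" s.2.2.2)] else s.2.1
  (texts, tables)

-- ===== PORT B =====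
-- bGo consumes one maximal same-kind run (= lines[i:j] of Source B) per call
def bGo : List String → List String × List (List String)
  | [] => ([], [])
  | l :: rest =>
    let key := PySem.Str.isIn "|" l
    let run := l :: rest.takeWhile (fun x => PySem.Str.isIn "|" x == key)
    let p := bGo (rest.dropWhile (fun x => PySem.Str.isIn "|" x == key))
    if key then (p.1, run :: p.2)
    else (PySem.Str.strip (PySem.Str.join "\n" run) :: p.1, p.2)
termination_by ls => ls.length
decreasing_by
  simpa using Nat.lt_succ_of_le (List.length_dropWhile_le _ _)

def extract_text_and_tables_alt (md_content : String) : List String × List (List String) :=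
  bGo ((PySem.Str.split? md_content "\n").getD [])

-- ===== PRECONDITION & SPEC =====
def Spec_extract_text_and_tables (md_content : String) (out : List String × List (List String)) : Prop := out = extract_text_and_tables_alt md_content
instance (md_content : String) (out : List String × List (List String)) : Decidable (Spec_extract_text_and_tables md_content out) := by unfold Spec_extract_text_and_tables; infer_instance

-- ===== CLAIM (what is proved, stated in full; the proofs are below) =====
def Claim_equal_extract_text_and_tables : Prop := ∀ (md_content : String), Dom_extract_text_and_tables md_content → Spec_extract_text_and_tables md_content (extract_text_and_tables md_content)

-- ===== LEMMAS AND PROOFS =====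

theorem takeWhile_all_append {α : Type} (p : α → Bool) (xs ys : List α)
    (h : ∀ x ∈ xs, p x = true) : (xs ++ ys).takeWhile p = xs ++ ys.takeWhile p := by
  induction xs with
  | nil => simp
  | cons a xs ih =>
    simp only [List.cons_append, List.takeWhile_cons, h a (by simp)]
    simp [ih (fun x hx => h x (by simp [hx]))]

theorem dropWhile_all_append {α : Type} (p : α → Bool) (xs ys : List α)
    (h : ∀ x ∈ xs, p x = true) : (xs ++ ys).dropWhile p = ys.dropWhile p := by
  induction xs with
  | nil => simp
  | cons a xs ih =>
    simp only [List.cons_append, List.dropWhile_cons, h a (by simp)]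
    simp [ih (fun x hx => h x (by simp [hx]))]

theorem bGo_nil : bGo [] = ([], []) := by rw [bGo]

-- head of ls (if any) is a table line
def headTable : List String → Prop
  | [] => True
  | l :: _ => PySem.Str.isIn "|" l = true

-- head of ls (if any) has no '|'
def headText : List String → Prop
  | [] => True
  | l :: _ => PySem.Str.isIn "|" l = false

theorem bGo_text_prepend (c : String) (cx ls : List String)
    (hc : PySem.Str.isIn "|" c = false)
    (hcx : ∀ x ∈ cx, PySem.Str.isIn "|" x = false)
    (hls : headTable ls) :
    bGo (c :: cx ++ ls) = (PySem.Str.strip (PySem.Str.join "\n" (c :: cx)) :: (bGo ls).1, (bGo ls).2) := by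
  have hc' : PySem.Chars.isIn ['|'] c.toList = false := by simpa using hc
  have hp : ∀ x ∈ cx, (!PySem.Chars.isIn ['|'] x.toList) = true := by
    intro x hx; have := hcx x hx; simp at this; simp [this]
  have htl : ls.takeWhile (fun x => !PySem.Chars.isIn ['|'] x.toList) = [] := by
    cases ls with
    | nil => simp
    | cons l t =>
      have hl' : PySem.Chars.isIn ['|'] l.toList = true := by simpa using (hls : PySem.Str.isIn "|" l = true)
      simp [hl']
  have hdl : ls.dropWhile (fun x => !PySem.Chars.isIn ['|'] x.toList) = ls := by
    cases ls with
    | nil => simp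
    | cons l t =>
      have hl' : PySem.Chars.isIn ['|'] l.toList = true := by simpa using (hls : PySem.Str.isIn "|" l = true)
      simp [hl']
  rw [bGo.eq_def]
  simp [hc', takeWhile_all_append _ cx ls hp, dropWhile_all_append _ cx ls hp, htl, hdl]

theorem bGo_table_prepend (c : String) (ct ls : List String)
    (hc : PySem.Str.isIn "|" c = true)
    (hct : ∀ x ∈ ct, PySem.Str.isIn "|" x = true)
    (hls : headText ls) :
    bGo (c :: ct ++ ls) = ((bGo ls).1, (c :: ct) :: (bGo ls).2) := by
  have hc' : PySem.Chars.isIn ['|'] c.toList = true := by simpa using hc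
  have hp : ∀ x ∈ ct, PySem.Chars.isIn ['|'] x.toList = true := by
    intro x hx; simpa using hct x hx
  have htl : ls.takeWhile (fun x => PySem.Chars.isIn ['|'] x.toList) = [] := by
    cases ls with
    | nil => simp
    | cons l t =>
      have hl' : PySem.Chars.isIn ['|'] l.toList = false := by simpa using (hls : PySem.Str.isIn "|" l = false)
      simp [hl']
  have hdl : ls.dropWhile (fun x => PySem.Chars.isIn ['|'] x.toList) = ls := by
    cases ls with
    | nil => simp
    | cons l t =>
      have hl' : PySem.Chars.isIn ['|'] l.toList = false := by simpa using (hls : PySem.Str.isIn "|" l = false)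
      simp [hl']
  rw [bGo.eq_def]
  simp [hc', takeWhile_all_append _ ct ls hp, dropWhile_all_append _ ct ls hp, htl, hdl]

-- A's final flush, as on the return line of A
def aFlush (s : List (List String) × List String × List String × List String) :
    List String × List (List String) :=
  (if s.2.2.2 ≠ [] then s.2.1 ++ [PySem.Str.strip (PySem.Str.join "\n" s.2.2.2)] else s.2.1,
   if s.2.2.1 ≠ [] then s.1 ++ [s.2.2.1] else s.1)

-- the two invariant statements (pending text run / pending table run)
def InvText (ls : List String) : Prop :=
  ∀ (tables : List (List String)) (texts cx : List String),
    (∀ x ∈ cx, PySem.Str.isIn "|" x = false) →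
    aFlush (ls.foldl aStep (tables, texts, [], cx)) =
      (texts ++ (bGo (cx ++ ls)).1, tables ++ (bGo (cx ++ ls)).2)

def InvTable (ls : List String) : Prop :=
  ∀ (tables : List (List String)) (texts ct : List String),
    (∀ x ∈ ct, PySem.Str.isIn "|" x = true) → ct ≠ [] →
    aFlush (ls.foldl aStep (tables, texts, ct, [])) =
      (texts ++ (bGo (ct ++ ls)).1, tables ++ (bGo (ct ++ ls)).2)

theorem inv_nil : InvText [] ∧ InvTable [] := by
  constructor
  · intro tables texts cx hcx
    cases cx with
    | nil => simp [aFlush, bGo_nil]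
    | cons c cx' =>
      have h := bGo_text_prepend c cx' [] (hcx c (by simp))
        (fun x hx => hcx x (by simp [hx])) trivial
      simp only [List.append_nil] at h ⊢
      simp [aFlush, h, bGo_nil]
  · intro tables texts ct hct hne
    cases ct with
    | nil => exact absurd rfl hne
    | cons c ct' =>
      have h := bGo_table_prepend c ct' [] (hct c (by simp))
        (fun x hx => hct x (by simp [hx])) trivial
      simp only [List.append_nil] at h ⊢
      simp [aFlush, h, bGo_nil]

theorem main_inv (n : ℕ) : ∀ ls : List String, ls.length ≤ n → InvText ls ∧ InvTable ls := by
  induction n with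
  | zero =>
    intro ls hls
    have : ls = [] := List.length_eq_zero_iff.mp (Nat.le_zero.mp hls)
    subst this; exact inv_nil
  | succ n ih =>
    intro ls hls
    cases ls with
    | nil => exact inv_nil
    | cons l rest =>
      have hrest : rest.length ≤ n := Nat.lt_succ_iff.mp (by simpa using hls)
      constructor
      · intro tables texts cx hcx
        by_cases hl : PySem.Str.isIn "|" l = true
        · -- text run ends; l starts a table run
          have hlC : PySem.Chars.isIn ['|'] l.toList = true := by simpa using hl
          have hstep : aStep (tables, texts, [], cx) l =
              (tables, (if cx ≠ [] then texts ++ [PySem.Str.strip (PySem.Str.join "\n" cx)] else texts), [l], []) := by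
            simp [aStep, hlC]
          rw [List.foldl_cons, hstep]
          have hb := (ih rest hrest).2 tables
            (if cx ≠ [] then texts ++ [PySem.Str.strip (PySem.Str.join "\n" cx)] else texts)
            [l] (by intro x hx; rw [List.mem_singleton] at hx; subst hx; exact hl) (by simp)
          rw [hb]
          cases cx with
          | nil => simp
          | cons c cx' =>
            have hpre := bGo_text_prepend c cx' (l :: rest) (hcx c (by simp))
              (fun x hx => hcx x (by simp [hx])) hl
            simp only [List.cons_append] at hpre ⊢
            rw [hpre]
            simp
        · -- l continues the text run
          have hl' : PySem.Str.isIn "|" l = false := by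
            cases h : PySem.Str.isIn "|" l with
            | false => rfl
            | true => exact absurd h hl
          have hlC : PySem.Chars.isIn ['|'] l.toList = false := by simpa using hl'
          have hstep : aStep (tables, texts, [], cx) l = (tables, texts, [], cx ++ [l]) := by
            simp [aStep, hlC]
          rw [List.foldl_cons, hstep]
          have hb := (ih rest hrest).1 tables texts (cx ++ [l])
            (by intro x hx
                rcases List.mem_append.mp hx with h | h
                · exact hcx x h
                · simp at h; subst h; exact hl')
          rw [hb]
          simp
      · intro tables texts ct hct hne
        by_cases hl : PySem.Str.isIn "|" l = true
        · -- l continues the table run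
          have hlC : PySem.Chars.isIn ['|'] l.toList = true := by simpa using hl
          have hstep : aStep (tables, texts, ct, []) l = (tables, texts, ct ++ [l], []) := by
            simp [aStep, hlC]
          rw [List.foldl_cons, hstep]
          have hb := (ih rest hrest).2 tables texts (ct ++ [l])
            (by intro x hx
                rcases List.mem_append.mp hx with h | h
                · exact hct x h
                · simp at h; subst h; exact hl)
            (by simp)
          rw [hb]
          simp
        · -- table run ends; l starts a text run
          have hl' : PySem.Str.isIn "|" l = false := by
            cases h : PySem.Str.isIn "|" l with
            | false => rfl
            | true => exact absurd h hl
          have hlC : PySem.Chars.isIn ['|'] l.toList = false := by simpa using hl'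
          have hstep : aStep (tables, texts, ct, []) l = (tables ++ [ct], texts, [], [l]) := by
            simp [aStep, hlC, hne]
          rw [List.foldl_cons, hstep]
          have hb := (ih rest hrest).1 (tables ++ [ct]) texts [l] (by intro x hx; rw [List.mem_singleton] at hx; subst hx; exact hl')
          rw [hb]
          cases ct with
          | nil => exact absurd rfl hne
          | cons c ct' =>
            have hpre := bGo_table_prepend c ct' (l :: rest) (hct c (by simp))
              (fun x hx => hct x (by simp [hx])) hl'
            simp only [List.cons_append] at hpre ⊢
            rw [hpre]
            simp

-- ===== VERDICT (by name: the statement is the Claim_ definition above) =====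
theorem extract_text_and_tables_spec : Claim_equal_extract_text_and_tables := by
  intro md _
  unfold Spec_extract_text_and_tables extract_text_and_tables extract_text_and_tables_alt
  have h := (main_inv ((PySem.Str.split? md "\n").getD []).length ((PySem.Str.split? md "\n").getD []) le_rfl).1
    [] [] [] (by simp)
  simpa [aFlush] using h
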